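-- pv_equiv track=rewrite | github.com/kangsunwoo827/poker-quiz-bot | scripts/autofix_ranges.py | fix_offsuit_monotonicity
-- ===== SOURCE A (Python) =====
-- RANKS = "AKQJT98765432"
--
-- def fix_offsuit_monotonicity(action_set, mixed_set):
--     """Fix offsuit sequences per high card."""
--     adds = set()
--     removes = set()
--     all_action = action_set | mixed_set
--
--     for hi_idx in range(13):
--         hi = RANKS[hi_idx]
--         offsuit = [f"{hi}{RANKS[lo]}o" for lo in range(hi_idx + 1, 13)]
--         in_range = [h for h in offsuit if h in all_action]
--         if not in_range:
--             continue
--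
--         for hand in in_range:
--             idx = offsuit.index(hand)
--             missing_stronger = [offsuit[j] for j in range(idx) if offsuit[j] not in all_action]
--             if missing_stronger:
--                 if len(missing_stronger) >= 2:
--                     removes.add(hand)
--                 else:
--                     adds.update(missing_stronger)
--
--     return adds, removes
-- ===== SOURCE B (Python) =====
-- RANKS = "AKQJT98765432"
--
-- def fix_offsuit_monotonicity(action_set, mixed_set):
--     """Fix offsuit sequences per high card: one pass per high card, carrying
--     the running list of missing stronger offsuit hands seen so far."""
--     adds = set()
--     removes = set()
--     all_action = action_set | mixed_set
--
--     for hi_idx in range(13):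
--         hi = RANKS[hi_idx]
--         missing = []
--         for lo in range(hi_idx + 1, 13):
--             hand = f"{hi}{RANKS[lo]}o"
--             if hand in all_action:
--                 if len(missing) >= 2:
--                     removes.add(hand)
--                 elif len(missing) == 1:
--                     adds.add(missing[0])
--             else:
--                 missing.append(hand)
--     return adds, removes
-- ===== Notes on version B (the rewrite author's own statement) =====
-- stated objective: alternative
-- what changed: Replaces the per-hand offsuit.index() lookup and range(idx) re-scan (and the intermediate in_range list) with a single pass over each high card's offsuit sequence that carries the running list of missing stronger hands.
import Mathlib
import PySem

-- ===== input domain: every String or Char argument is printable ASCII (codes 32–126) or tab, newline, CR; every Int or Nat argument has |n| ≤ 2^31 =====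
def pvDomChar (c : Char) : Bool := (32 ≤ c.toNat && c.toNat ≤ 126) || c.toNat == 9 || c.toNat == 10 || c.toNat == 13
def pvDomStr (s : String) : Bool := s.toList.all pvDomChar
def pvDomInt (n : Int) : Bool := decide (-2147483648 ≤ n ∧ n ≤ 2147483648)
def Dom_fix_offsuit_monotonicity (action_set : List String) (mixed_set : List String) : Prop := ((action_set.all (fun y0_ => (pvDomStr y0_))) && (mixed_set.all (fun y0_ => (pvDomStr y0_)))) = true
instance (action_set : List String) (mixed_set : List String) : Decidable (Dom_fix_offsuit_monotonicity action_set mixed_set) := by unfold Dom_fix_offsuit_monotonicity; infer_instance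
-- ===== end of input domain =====

-- B replaces A's per-hand offsuit.index()/range(idx) prefix re-scan with one pass per high
-- card carrying the running list of missing stronger hands (alternative decomposition).

-- ===== PORT A =====
def RANKS : String := "AKQJT98765432"

-- shared by both ports: RANKS[i] as a 1-char string ('' unreachable: index always in 0..12)
def pvRankStr (i : Int) : String := (PySem.Str.pyGet? RANKS i).elim "" (fun c => String.ofList [c])

-- shared by both ports: f"{hi}{RANKS[lo]}o"
def pvMkHand (hi : String) (lo : Int) : String := hi ++ pvRankStr lo ++ "o"

-- body of A's inner 'for hand in in_range' loop
def pvAStep (all_action : PySem.Set String) (offsuit : List String)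
    (s : PySem.Set String × PySem.Set String) (hand : String) :
    PySem.Set String × PySem.Set String :=
  let idx : Int := (((PySem.List.index? offsuit hand).getD 0 : Nat) : Int)  -- hand ∈ in_range ⊆ offsuit, so index? always finds it
  let missing_stronger : List String :=
    (PySem.List.pyRange 0 idx 1).foldl (fun acc j =>
      match PySem.List.pyGet? offsuit j with        -- j < idx ≤ len, so pyGet? always some
      | some x => if PySem.Set.contains all_action x then acc else acc ++ [x]
      | none => acc) []
  if missing_stronger ≠ [] then
    if 2 ≤ missing_stronger.length then (s.1, PySem.Set.add s.2 hand)
    else (missing_stronger.foldl PySem.Set.add s.1, s.2)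
  else s

def fix_offsuit_monotonicity (action_set : List String) (mixed_set : List String) : List String × List String :=
  let adds : PySem.Set String := PySem.Set.empty
  let removes : PySem.Set String := PySem.Set.empty
  let all_action : PySem.Set String := PySem.Set.union (PySem.Set.ofList action_set) mixed_set
  (PySem.List.pyRange 0 13 1).foldl (fun s hi_idx =>
    let hi := pvRankStr hi_idx
    let offsuit := (PySem.List.pyRange (hi_idx + 1) 13 1).map (fun lo => pvMkHand hi lo)
    let in_range := offsuit.filter (fun h => PySem.Set.contains all_action h)
    if in_range = [] then s
    else in_range.foldl (pvAStep all_action offsuit) s) (adds, removes)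

-- ===== PORT B =====
-- B's inner loop: one pass over the lo-range, carrying the running 'missing' list
def pvBInner (all_action : PySem.Set String) (hi : String) :
    List Int → List String → PySem.Set String × PySem.Set String → PySem.Set String × PySem.Set String
  | [], _, s => s
  | lo :: rest, missing, (adds, removes) =>
    let hand := pvMkHand hi lo
    if PySem.Set.contains all_action hand then
      if 2 ≤ missing.length then pvBInner all_action hi rest missing (adds, PySem.Set.add removes hand)
      else if missing.length = 1 then
        pvBInner all_action hi rest missing (PySem.Set.add adds (missing.headD ""), removes)  -- missing[0]; length = 1 so head exists
      else pvBInner all_action hi rest missing (adds, removes)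
    else pvBInner all_action hi rest (missing ++ [hand]) (adds, removes)

def fix_offsuit_monotonicity_alt (action_set : List String) (mixed_set : List String) : List String × List String :=
  let all_action : PySem.Set String := PySem.Set.union (PySem.Set.ofList action_set) mixed_set
  (PySem.List.pyRange 0 13 1).foldl (fun s hi_idx =>
    pvBInner all_action (pvRankStr hi_idx) (PySem.List.pyRange (hi_idx + 1) 13 1) [] s)
    (PySem.Set.empty, PySem.Set.empty)

-- ===== PRECONDITION & SPEC =====
def Spec_fix_offsuit_monotonicity (action_set : List String) (mixed_set : List String) (out : List String × List String) : Prop := out = fix_offsuit_monotonicity_alt action_set mixed_set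
instance (action_set : List String) (mixed_set : List String) (out : List String × List String) : Decidable (Spec_fix_offsuit_monotonicity action_set mixed_set out) := by unfold Spec_fix_offsuit_monotonicity; infer_instance

-- ===== CLAIM (what is proved, stated in full; the proofs are below) =====
def Claim_equal_fix_offsuit_monotonicity : Prop := ∀ (action_set : List String) (mixed_set : List String), Dom_fix_offsuit_monotonicity action_set mixed_set → Spec_fix_offsuit_monotonicity action_set mixed_set (fix_offsuit_monotonicity action_set mixed_set)

-- ===== LEMMAS AND PROOFS =====

-- abstract form of B's inner pass, over the list of hand strings
def pvProcB (m : String → Bool) :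
    List String → List String → PySem.Set String × PySem.Set String → PySem.Set String × PySem.Set String
  | [], _, s => s
  | h :: t, missing, (adds, removes) =>
    if m h then
      if 2 ≤ missing.length then pvProcB m t missing (adds, PySem.Set.add removes h)
      else if missing.length = 1 then pvProcB m t missing (PySem.Set.add adds (missing.headD ""), removes)
      else pvProcB m t missing (adds, removes)
    else pvProcB m t (missing ++ [h]) (adds, removes)

theorem pvBInner_eq_procB (all_action : PySem.Set String) (hi : String)
    (los : List Int) (missing : List String) (s : PySem.Set String × PySem.Set String) :
    pvBInner all_action hi los missing s
      = pvProcB (fun h => PySem.Set.contains all_action h) (los.map (pvMkHand hi)) missing s := by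
  induction los generalizing missing s with
  | nil => obtain ⟨a, r⟩ := s; rfl
  | cons lo rest ih =>
      obtain ⟨a, r⟩ := s
      simp only [pvBInner, pvProcB, List.map_cons]
      split_ifs <;> apply ih

theorem pvFoldlFilter (m : String → Bool) :
    ∀ (P init : List String),
    P.foldl (fun acc x => if m x then acc else acc ++ [x]) init = init ++ P.filter (fun x => ! m x) := by
  intro P
  induction P with
  | nil => simp
  | cons x t ih =>
      intro init
      by_cases hmx : m x
      · simp [hmx, ih]
      · simp [hmx, ih]

theorem pvFoldAdd_eq (P : List String) (m : String → Bool) (rest : List String)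
    (init : List String) :
    (PySem.List.pyRange 0 (P.length : Int) 1).foldl (fun acc j =>
        match PySem.List.pyGet? (P ++ rest) j with
        | some x => if m x then acc else acc ++ [x]
        | none => acc) init
      = init ++ P.filter (fun x => ! m x) := by
  have hcongr : (PySem.List.pyRange 0 (P.length : Int) 1).foldl (fun acc j =>
        match PySem.List.pyGet? (P ++ rest) j with
        | some x => if m x then acc else acc ++ [x]
        | none => acc) init
      = (PySem.List.pyRange 0 (P.length : Int) 1).foldl (fun acc j =>
          (fun acc x => if m x then acc else acc ++ [x]) acc (PySem.List.pyGetD P j "")) init := by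
    refine PySem.List.foldl_congr_mem _ _ _ _ (fun acc j hj => ?_)
    rw [PySem.List.mem_pyRange_one] at hj
    have hjlt : j.toNat < P.length := by omega
    have hget : PySem.List.pyGet? (P ++ rest) j = some (P.getD j.toNat "") := by
      rw [PySem.List.pyGet?_of_nonneg _ hj.1, List.getElem?_append_left hjlt,
        List.getElem?_eq_getElem hjlt, List.getD_eq_getElem _ _ hjlt]
    rw [hget, PySem.List.pyGetD_of_nonneg P "" hj.1]
  rw [hcongr, PySem.List.foldl_pyRange_zero_pyGetD' P "" (fun acc x => if m x then acc else acc ++ [x]) init]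
  exact pvFoldlFilter m P init

theorem pvProcB_all_absent (m : String → Bool) (L missing : List String)
    (s : PySem.Set String × PySem.Set String) (h : ∀ x ∈ L, m x = false) :
    pvProcB m L missing s = s := by
  induction L generalizing missing with
  | nil => obtain ⟨a, r⟩ := s; rfl
  | cons x t ih =>
      obtain ⟨a, r⟩ := s
      simp only [pvProcB, h x List.mem_cons_self]
      exact ih _ (fun y hy => h y (List.mem_cons_of_mem _ hy))

theorem pvMain (m : String → Bool) (all_action : PySem.Set String)
    (hm : ∀ x, m x = PySem.Set.contains all_action x) :
    ∀ (L P : List String) (s : PySem.Set String × PySem.Set String),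
    (P ++ L).Nodup →
    (L.filter m).foldl (pvAStep all_action (P ++ L)) s
      = pvProcB m L (P.filter (fun x => ! m x)) s := by
  intro L
  induction L with
  | nil => intro P s _; obtain ⟨a, r⟩ := s; rfl
  | cons h t ih =>
      intro P s hnd
      obtain ⟨a, r⟩ := s
      have hP : h ∉ P := fun hmem =>
        (List.disjoint_of_nodup_append hnd) hmem (List.mem_cons_self)
      have hnd' : ((P ++ [h]) ++ t).Nodup := by simpa using hnd
      have hidx : PySem.List.index? (P ++ h :: t) h = some P.length :=
        (PySem.List.index?_eq_some_iff _ _ _).mpr ⟨P, t, rfl, rfl, hP⟩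
      have hstep : ∀ s0 : PySem.Set String × PySem.Set String,
          pvAStep all_action (P ++ h :: t) s0 h =
          (let miss := P.filter (fun x => ! m x);
           if miss ≠ [] then
             if 2 ≤ miss.length then (s0.1, PySem.Set.add s0.2 h)
             else (miss.foldl PySem.Set.add s0.1, s0.2)
           else s0) := by
        intro s0
        simp only [pvAStep, hidx, Option.getD_some]
        simp only [← hm]
        rw [pvFoldAdd_eq P m (h :: t) []]
        simp only [List.nil_append]
      have hrec := fun s' => ih (P ++ [h]) s' hnd'
      by_cases hmh : m h
      · rw [List.filter_cons_of_pos hmh, List.foldl_cons, hstep]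
        have hfilP : (P ++ [h]).filter (fun x => ! m x) = P.filter (fun x => ! m x) := by
          simp [List.filter_append, hmh]
        simp only [hfilP, List.append_assoc, List.singleton_append] at hrec
        simp only [pvProcB, hmh, if_pos]
        rcases hmiss : P.filter (fun x => ! m x) with _ | ⟨x, _ | ⟨y, zs⟩⟩ <;>
          simp only [hmiss] at hrec ⊢ <;> simp [hrec]
      · rw [List.filter_cons_of_neg hmh]
        have hfilP : (P ++ [h]).filter (fun x => ! m x) =
            P.filter (fun x => ! m x) ++ [h] := by
          simp [List.filter_append, hmh]
        simp only [hfilP, List.append_assoc, List.singleton_append] at hrec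
        rw [hrec (a, r)]
        simp [pvProcB, hmh]

theorem pvOffsuit_nodup (hi_idx : Int) (h0 : 0 ≤ hi_idx) (h13 : hi_idx < 13) :
    ((PySem.List.pyRange (hi_idx + 1) 13 1).map (fun lo => pvMkHand (pvRankStr hi_idx) lo)).Nodup := by
  interval_cases hi_idx <;> decide

-- ===== VERDICT (by name: the statement is the Claim_ definition above) =====
theorem fix_offsuit_monotonicity_spec : Claim_equal_fix_offsuit_monotonicity := by
  intro action_set mixed_set _
  simp only [Spec_fix_offsuit_monotonicity, fix_offsuit_monotonicity, fix_offsuit_monotonicity_alt]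
  refine PySem.List.foldl_congr_mem _ _ _ _ (fun s hi_idx hmem => ?_)
  rw [PySem.List.mem_pyRange_one] at hmem
  rw [pvBInner_eq_procB]
  have hnd := pvOffsuit_nodup hi_idx hmem.1 hmem.2
  have hmain := pvMain
      (fun h => PySem.Set.contains (PySem.Set.union (PySem.Set.ofList action_set) mixed_set) h)
      _ (fun x => rfl)
      ((PySem.List.pyRange (hi_idx + 1) 13 1).map (fun lo => pvMkHand (pvRankStr hi_idx) lo)) [] s
      (by simpa using hnd)
  simp only [List.nil_append, List.filter_nil] at hmain
  by_cases hempty : ((PySem.List.pyRange (hi_idx + 1) 13 1).map (fun lo => pvMkHand (pvRankStr hi_idx) lo)).filter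
      (fun h => PySem.Set.contains (PySem.Set.union (PySem.Set.ofList action_set) mixed_set) h) = []
  · rw [if_pos hempty]
    refine (pvProcB_all_absent _ _ _ _ (fun x hx => ?_)).symm
    have := List.filter_eq_nil_iff.mp hempty x hx
    simpa using this
  · rw [if_neg hempty]
    exact hmain
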